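-- pv_equiv track=rewrite | github.com/vdesgrange/agent_based_modelling | civil_violence/SA_work.py | get_outbreaks
-- ===== SOURCE A (Python) =====
-- def get_outbreaks(data, threshold):
--     """
--     Calculates the outbreaks from the actives data.
--
--     Returns:
--         - An array with the outbreak peak sizes.
--         - An array with the outbreak durations.
--     """
--     outbreak_peaks = []
--     outbreak_widths = []
--     counting = False
--     current_peak = 0
--     start = 0
--
--     for i in range(len(data)):
--
--         if data[i] >= threshold and not counting:
--             counting = True
--             if current_peak < data[i]:
--                 current_peak = data[i]
--             start = i
--
--         elif data[i] >= threshold and counting: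
--             if current_peak < data[i]:
--                 current_peak = data[i]
--
--         elif data[i] < threshold and counting:
--             outbreak_peaks.append(current_peak)
--             outbreak_widths.append(i-start)
--             current_peak = 0
--             counting = False
--
--     # Capture cases where timeline ends in an outbreak.
--     # Obviously skewers data, but preferable over 0 or infinite outbreaks.
--     if not outbreak_peaks and counting:
--         outbreak_peaks.append(current_peak)
--         outbreak_widths.append(len(data))
--     elif outbreak_peaks and counting:
--         outbreak_peaks.append(current_peak)
--         outbreak_widths.append(len(data)-start)
--     elif not outbreak_peaks and not counting:
--         outbreak_peaks.append(0)
--         outbreak_widths.append(0)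
--
--     return outbreak_peaks, outbreak_widths
-- ===== SOURCE B (Python) =====
-- def get_outbreaks(data, threshold):
--     # Decompose the timeline into maximal runs of values >= threshold,
--     # recording (peak, length) per run, then read the answers off the runs.
--     runs = []
--     i, n = 0, len(data)
--     while i < n:
--         if data[i] < threshold:
--             i += 1
--         else:
--             peak = 0
--             j = i
--             while j < n and data[j] >= threshold:
--                 if peak < data[j]:
--                     peak = data[j]
--                 j += 1
--             runs.append((peak, j - i))
--             i = j
--     if not runs:
--         return [0], [0]
--     return [p for p, _ in runs], [w for _, w in runs]
-- ===== Notes on version B (the rewrite author's own statement) =====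
-- stated objective: alternative
-- what changed: B replaces A's five-variable scanning state machine (counting/current_peak/start flags plus a trailing four-branch if/elif chain) by first decomposing the timeline into maximal runs of values >= threshold, collecting (peak, length) per run, and reading both result lists off that run list.
-- intended difference: On data that ends inside its single outbreak when that outbreak starts after index 0, A reports the outbreak duration as len(data) (A's own comment admits this 'skewers data') while B reports the actual run length len(data)-start, the intended duration. — e.g. on get_outbreaks([0, 5], 1): A returns ([5], [2]), B returns ([5], [1])
import Mathlib
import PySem

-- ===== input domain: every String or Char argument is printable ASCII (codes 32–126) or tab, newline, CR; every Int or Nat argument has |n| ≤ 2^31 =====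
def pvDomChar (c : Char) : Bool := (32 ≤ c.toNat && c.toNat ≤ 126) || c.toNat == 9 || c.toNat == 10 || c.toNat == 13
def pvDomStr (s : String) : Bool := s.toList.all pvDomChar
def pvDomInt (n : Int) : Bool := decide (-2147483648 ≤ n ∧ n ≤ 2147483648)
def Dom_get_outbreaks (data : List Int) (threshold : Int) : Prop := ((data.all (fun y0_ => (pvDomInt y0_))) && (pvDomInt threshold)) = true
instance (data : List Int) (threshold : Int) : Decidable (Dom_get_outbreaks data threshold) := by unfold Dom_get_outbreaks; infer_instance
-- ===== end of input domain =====

-- B decomposes the timeline into maximal runs of values >= threshold (a run list built once,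
-- read off twice) instead of A's five-variable scanning state machine; objective: alternative
-- (same O(n) cost).  On data ending inside its single outbreak when that outbreak starts after
-- index 0, B reports the run length where A reports len(data) (D_get_outbreaks below).

-- ===== PORT A =====
-- A's `for i in range(len(data))` loop reads (i, data[i]); indices kept as Python ints
def enumFromA (i : Int) : List Int → List (Int × Int)
  | [] => []
  | x :: rest => (i, x) :: enumFromA (i + 1) rest

-- loop state = (outbreak_peaks, outbreak_widths, counting, current_peak, start)
def loopA (t : Int) : List (Int × Int) → List Int × List Int × Bool × Int × Int → List Int × List Int × Bool × Int × Int
  | [], st => st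
  | (i, x) :: rest, (pk, wd, counting, cur, start) =>
    if t ≤ x ∧ counting = false then
      loopA t rest (pk, wd, true, if cur < x then x else cur, i)
    else if t ≤ x ∧ counting = true then
      loopA t rest (pk, wd, true, if cur < x then x else cur, start)
    else if x < t ∧ counting = true then
      loopA t rest (pk ++ [cur], wd ++ [i - start], false, 0, start)
    else
      loopA t rest (pk, wd, counting, cur, start)

-- A's trailing if/elif chain
def finishA (n : Int) (st : List Int × List Int × Bool × Int × Int) : List Int × List Int :=
  let (pk, wd, counting, cur, start) := st
  if pk = [] ∧ counting = true then (pk ++ [cur], wd ++ [n])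
  else if pk ≠ [] ∧ counting = true then (pk ++ [cur], wd ++ [n - start])
  else if pk = [] ∧ counting = false then (pk ++ [(0:Int)], wd ++ [(0:Int)])
  else (pk, wd)

def get_outbreaks (data : List Int) (threshold : Int) : List Int × List Int :=
  finishA (data.length : Int) (loopA threshold (enumFromA 0 data) ([], [], false, 0, 0))

-- ===== PORT B =====
-- Source B's two nested while loops: `runsB` is the outer loop (skip below-threshold values),
-- `runGo` the inner run scan carrying (peak, length); the inner loop's first iteration
-- (data[i] itself, peak initialised to 0) is the `runGo … (if 0 < x then x else 0) 1` call.
mutual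
def runsB (t : Int) : List Int → List (Int × Nat)
  | [] => []
  | x :: rest =>
    if x < t then runsB t rest
    else runGo t rest (if (0:Int) < x then x else 0) 1
def runGo (t : Int) : List Int → Int → Nat → List (Int × Nat)
  | [], peak, k => [(peak, k)]
  | x :: rest, peak, k =>
    if t ≤ x then runGo t rest (if peak < x then x else peak) (k + 1)
    else (peak, k) :: runsB t rest
end

def get_outbreaks_alt (data : List Int) (threshold : Int) : List Int × List Int :=
  let rs := runsB threshold data
  if rs = [] then ([0], [0])
  else (rs.map Prod.fst, rs.map (fun r => ((r.2 : Nat) : Int)))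

-- ===== PRECONDITION & SPEC =====
-- On data that ends inside its single outbreak and that outbreak starts after index 0, A returns
-- the outbreak duration len(data) (its own comment admits this "skewers data") while B returns
-- the actual run length len(data)-start, the intended duration.
def D_get_outbreaks (data : List Int) (threshold : Int) : Prop :=
  0 < (data.takeWhile (fun v => decide (v < threshold))).length ∧
  (data.takeWhile (fun v => decide (v < threshold))).length < data.length ∧
  ∀ x ∈ data.drop (data.takeWhile (fun v => decide (v < threshold))).length, threshold ≤ x
instance (data : List Int) (threshold : Int) : Decidable (D_get_outbreaks data threshold) := by
  unfold D_get_outbreaks; infer_instance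
def Spec_get_outbreaks (data : List Int) (threshold : Int) (out : List Int × List Int) : Prop :=
  ¬ D_get_outbreaks data threshold → out = get_outbreaks_alt data threshold
instance (data : List Int) (threshold : Int) (out : List Int × List Int) : Decidable (Spec_get_outbreaks data threshold out) := by unfold Spec_get_outbreaks; infer_instance
def pvDiffWitness_get_outbreaks : List Int × Int := ([0, 5], 1)
def pvDiffWitnessOut_get_outbreaks : (List Int × List Int) × (List Int × List Int) := (([5], [2]), ([5], [1]))

-- ===== CLAIM (what is proved, stated in full; the proofs are below) =====
def Claim_unchanged_get_outbreaks : Prop := ∀ (data : List Int) (threshold : Int), Dom_get_outbreaks data threshold → Spec_get_outbreaks data threshold (get_outbreaks data threshold)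
def Claim_changed_get_outbreaks : Prop := Dom_get_outbreaks (pvDiffWitness_get_outbreaks.1) (pvDiffWitness_get_outbreaks.2) ∧ D_get_outbreaks (pvDiffWitness_get_outbreaks.1) (pvDiffWitness_get_outbreaks.2) ∧ get_outbreaks (pvDiffWitness_get_outbreaks.1) (pvDiffWitness_get_outbreaks.2) = pvDiffWitnessOut_get_outbreaks.1 ∧ get_outbreaks_alt (pvDiffWitness_get_outbreaks.1) (pvDiffWitness_get_outbreaks.2) = pvDiffWitnessOut_get_outbreaks.2 ∧ pvDiffWitnessOut_get_outbreaks.1 ≠ pvDiffWitnessOut_get_outbreaks.2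
def Claim_exact_get_outbreaks : Prop := ∀ (data : List Int) (threshold : Int), Dom_get_outbreaks data threshold → D_get_outbreaks data threshold → get_outbreaks data threshold ≠ get_outbreaks_alt data threshold

-- ===== LEMMAS AND PROOFS =====

def peaksOf (rs : List (Int × Nat)) : List Int := rs.map Prod.fst
def widthsOf (rs : List (Int × Nat)) : List Int := rs.map (fun r => ((r.2 : Nat) : Int))

-- "the timeline ends inside an outbreak"
def endsHigh (t : Int) (xs : List Int) : Prop := ∃ v, xs.getLast? = some v ∧ t ≤ v
def endsBelow (t : Int) (xs : List Int) : Prop := ∃ v, xs.getLast? = some v ∧ v < t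

-- the state loopA reaches when the timeline ends inside an outbreak, expressed via a run list rs
def openState (i : Int) (len : Nat) (pk wd : List Int) (rs : List (Int × Nat)) :
    List Int × List Int × Bool × Int × Int :=
  (pk ++ peaksOf rs.dropLast, wd ++ widthsOf rs.dropLast,
   true, (rs.getLastD (0,0)).1, i + (len : Int) - (((rs.getLastD (0,0)).2 : Nat) : Int))

-- behaviour of loopA started with counting = False (fresh state)
def Sfresh (t : Int) (xs : List Int) : Prop :=
  ∀ (i s : Int) (pk wd : List Int),
    (¬ endsHigh t xs → ∃ s',
      loopA t (enumFromA i xs) (pk, wd, false, 0, s) =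
        (pk ++ peaksOf (runsB t xs), wd ++ widthsOf (runsB t xs), false, 0, s'))
    ∧ (endsHigh t xs →
      loopA t (enumFromA i xs) (pk, wd, false, 0, s) = openState i xs.length pk wd (runsB t xs)
      ∧ ((runsB t xs).dropLast = [] →
          ∃ ys zs, xs = ys ++ zs ∧ (∀ u ∈ ys, u < t) ∧ (∀ u ∈ zs, t ≤ u) ∧
            zs.length = ((runsB t xs).getLastD (0,0)).2 ∧ zs ≠ []))

-- behaviour of loopA in the middle of a run (counting = True, k elements seen, run began at s)
def Srun (t : Int) (xs : List Int) : Prop :=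
  ∀ (i s cur : Int) (k : Nat) (pk wd : List Int), i = s + (k : Int) →
    (¬ endsBelow t xs →
      loopA t (enumFromA i xs) (pk, wd, true, cur, s) = openState i xs.length pk wd (runGo t xs cur k)
      ∧ ((runGo t xs cur k).dropLast = [] → ∀ u ∈ xs, t ≤ u))
    ∧ (endsBelow t xs → ∃ s',
      loopA t (enumFromA i xs) (pk, wd, true, cur, s) =
        (pk ++ peaksOf (runGo t xs cur k), wd ++ widthsOf (runGo t xs cur k), false, 0, s'))


theorem endsHigh_cons (t x : Int) (rest : List Int) (h : rest ≠ []) :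
    endsHigh t (x :: rest) ↔ endsHigh t rest := by
  unfold endsHigh
  match rest, h with
  | y :: r, _ => rw [List.getLast?_cons_cons]

theorem endsBelow_cons (t x : Int) (rest : List Int) (h : rest ≠ []) :
    endsBelow t (x :: rest) ↔ endsBelow t rest := by
  unfold endsBelow
  match rest, h with
  | y :: r, _ => rw [List.getLast?_cons_cons]

theorem not_endsHigh_iff (t : Int) (xs : List Int) (h : xs ≠ []) :
    ¬ endsHigh t xs ↔ endsBelow t xs := by
  obtain ⟨v, hv⟩ := Option.isSome_iff_exists.mp (List.getLast?_isSome.mpr h)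
  unfold endsHigh endsBelow
  constructor
  · intro hne; exact ⟨v, hv, by by_contra hc; exact hne ⟨v, hv, by omega⟩⟩
  · rintro ⟨u, hu, hut⟩ ⟨w, hw, hwt⟩; rw [hu] at hw; simp at hw; omega

theorem getLastD_cons_ne {α : Type} (a d : α) (rs : List α) (h : rs ≠ []) :
    (a :: rs).getLastD d = rs.getLastD d := by
  match rs, h with
  | b :: r, _ => simp

theorem openState_shift (i : Int) (len : Nat) (pk wd : List Int) (rs : List (Int × Nat)) :
    openState (i + 1) len pk wd rs = openState i (len + 1) pk wd rs := by
  simp only [openState]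
  congr 1; congr 1; congr 1; congr 1
  push_cast; ring

theorem runsB_skip (t x : Int) (rest : List Int) (h : x < t) :
    runsB t (x :: rest) = runsB t rest := by simp [runsB, h]

theorem runsB_run (t x : Int) (rest : List Int) (h : ¬ x < t) :
    runsB t (x :: rest) = runGo t rest (if (0:Int) < x then x else 0) 1 := by simp [runsB, h]

theorem runGo_all_high (t : Int) (xs : List Int) (h : ∀ u ∈ xs, t ≤ u) :
    ∀ (p : Int) (k : Nat), runGo t xs p k =
      [(List.foldl (fun a v => if a < v then v else a) p xs, k + xs.length)] := by
  induction xs with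
  | nil => intro p k; simp [runGo]
  | cons x rest ih =>
    intro p k
    have hx : t ≤ x := h x (by simp)
    rw [runGo, if_pos hx, ih (fun u hu => h u (by simp [hu]))]
    simp [List.foldl]; omega

theorem loopA_step_fresh_low (t x i : Int) (l : List (Int × Int)) (pk wd : List Int) (cur s : Int)
    (h : x < t) : loopA t ((i, x) :: l) (pk, wd, false, cur, s) = loopA t l (pk, wd, false, cur, s) := by
  have h' : ¬ t ≤ x := by omega
  simp only [loopA]
  rw [if_neg (by simp [h']), if_neg (by simp [h']), if_neg (by simp)]

theorem loopA_step_fresh_high (t x i : Int) (l : List (Int × Int)) (pk wd : List Int) (cur s : Int)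
    (h : t ≤ x) : loopA t ((i, x) :: l) (pk, wd, false, cur, s) =
      loopA t l (pk, wd, true, if cur < x then x else cur, i) := by
  simp only [loopA]
  rw [if_pos ⟨h, trivial⟩]

theorem loopA_step_run_high (t x i : Int) (l : List (Int × Int)) (pk wd : List Int) (cur s : Int)
    (h : t ≤ x) : loopA t ((i, x) :: l) (pk, wd, true, cur, s) =
      loopA t l (pk, wd, true, if cur < x then x else cur, s) := by
  simp only [loopA]
  rw [if_neg (by simp), if_pos ⟨h, trivial⟩]

theorem loopA_step_run_low (t x i : Int) (l : List (Int × Int)) (pk wd : List Int) (cur s : Int)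
    (h : x < t) : loopA t ((i, x) :: l) (pk, wd, true, cur, s) =
      loopA t l (pk ++ [cur], wd ++ [i - s], false, 0, s) := by
  have h' : ¬ t ≤ x := by omega
  simp only [loopA]
  rw [if_neg (by simp [h']), if_neg (by simp [h']), if_pos ⟨h, trivial⟩]

theorem runGo_ne_nil (t : Int) (xs : List Int) (p : Int) (k : Nat) : runGo t xs p k ≠ [] := by
  induction xs generalizing p k with
  | nil => simp [runGo]
  | cons x rest ih => simp only [runGo]; split <;> simp [ih]

theorem runsB_ne_nil_of_endsHigh (t : Int) (xs : List Int) (h : endsHigh t xs) : runsB t xs ≠ [] := by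
  induction xs with
  | nil => obtain ⟨v, hv, _⟩ := h; simp at hv
  | cons x rest ih =>
    simp only [runsB]
    split
    · rename_i hx
      match rest, h with
      | [], ⟨v, hv, htv⟩ => simp at hv; omega
      | y :: r, h =>
        exact ih ⟨h.choose, by rw [← List.getLast?_cons_cons (a := x)]; exact h.choose_spec.1, h.choose_spec.2⟩
    · exact runGo_ne_nil t rest _ 1

theorem sfresh_nil (t : Int) : Sfresh t [] := by
  intro i s pk wd
  constructor
  · intro _
    exact ⟨s, by simp [enumFromA, loopA, runsB, peaksOf, widthsOf]⟩
  · rintro ⟨v, hv, -⟩; simp at hv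

theorem srun_nil (t : Int) : Srun t [] := by
  intro i s cur k pk wd hik
  constructor
  · intro _
    refine ⟨?_, by intro _ u hu; simp at hu⟩
    simp [enumFromA, loopA, runGo, openState, peaksOf, widthsOf]
    omega
  · rintro ⟨v, hv, -⟩; simp at hv

theorem main_induction (t : Int) : ∀ (n : Nat) (xs : List Int), xs.length ≤ n → Sfresh t xs ∧ Srun t xs := by
  intro n
  induction n with
  | zero =>
    intro xs hlen
    have hxs : xs = [] := by cases xs <;> simp_all
    subst hxs
    exact ⟨sfresh_nil t, srun_nil t⟩
  | succ n ih =>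
    intro xs hlen
    cases xs with
    | nil => exact ⟨sfresh_nil t, srun_nil t⟩
    | cons x rest =>
      have hrlen : rest.length ≤ n := by simp at hlen; omega
      have ihF : Sfresh t rest := (ih rest hrlen).1
      have ihR : Srun t rest := (ih rest hrlen).2
      constructor
      · -- Sfresh (x :: rest)
        intro i s pk wd
        by_cases hx : x < t
        · -- below threshold: loop skips the element
          have hstep : loopA t (enumFromA i (x :: rest)) (pk, wd, false, 0, s) =
              loopA t (enumFromA (i + 1) rest) (pk, wd, false, 0, s) := by
            simp only [enumFromA]; exact loopA_step_fresh_low t x i _ pk wd 0 s hx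
          have hrB := runsB_skip t x rest hx
          rcases eq_or_ne rest [] with hre | hre
          · subst hre
            constructor
            · intro _
              exact ⟨s, by rw [hstep, hrB]; simp [enumFromA, loopA, runsB, peaksOf, widthsOf]⟩
            · rintro ⟨v, hv, hvt⟩
              simp at hv; omega
          · constructor
            · intro hne
              obtain ⟨s', he⟩ := (ihF (i + 1) s pk wd).1
                (fun hh => hne ((endsHigh_cons t x rest hre).mpr hh))
              exact ⟨s', by rw [hstep, he, hrB]⟩
            · intro hyes
              have h2 := (ihF (i + 1) s pk wd).2 ((endsHigh_cons t x rest hre).mp hyes)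
              constructor
              · rw [hstep, h2.1, hrB, openState_shift]
                simp
              · intro hdl
                obtain ⟨ys, zs, hsp, hys, hzs, hlen2, hzne⟩ := h2.2 (by rw [hrB] at hdl; exact hdl)
                refine ⟨x :: ys, zs, by simp [hsp], ?_, hzs, by rw [hrB]; exact hlen2, hzne⟩
                intro u hu
                rcases List.mem_cons.mp hu with rfl | hu
                · exact hx
                · exact hys u hu
        · -- at/above threshold: a run begins
          have hxt : t ≤ x := not_lt.mp hx
          have hstep : loopA t (enumFromA i (x :: rest)) (pk, wd, false, 0, s) =
              loopA t (enumFromA (i + 1) rest) (pk, wd, true, if (0:Int) < x then x else 0, i) := by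
            simp only [enumFromA]; exact loopA_step_fresh_high t x i _ pk wd 0 s hxt
          have hrB := runsB_run t x rest hx
          have hSr := ihR (i + 1) i (if (0:Int) < x then x else 0) 1 pk wd (by push_cast; ring)
          rcases eq_or_ne rest [] with hre | hre
          · subst hre
            constructor
            · intro hne; exact absurd ⟨x, by simp, hxt⟩ hne
            · intro _
              constructor
              · rw [hstep]
                simp [enumFromA, loopA, hrB, runGo, openState, peaksOf, widthsOf]
              · intro _
                exact ⟨[], [x], rfl, by simp, by simpa using hxt, by simp [hrB, runGo], by simp⟩
          · constructor
            · intro hne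
              have hbl : endsBelow t rest := (not_endsHigh_iff t rest hre).mp
                (fun hh => hne ((endsHigh_cons t x rest hre).mpr hh))
              obtain ⟨s', he⟩ := hSr.2 hbl
              exact ⟨s', by rw [hstep, he, hrB]⟩
            · intro hyes
              have hhigh : ¬ endsBelow t rest := fun hb =>
                ((not_endsHigh_iff t rest hre).mpr hb) ((endsHigh_cons t x rest hre).mp hyes)
              have ho := hSr.1 hhigh
              constructor
              · rw [hstep, ho.1, hrB, openState_shift]
                simp
              · intro hdl
                have hall : ∀ u ∈ rest, t ≤ u := ho.2 (by rw [hrB] at hdl; exact hdl)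
                refine ⟨[], x :: rest, rfl, by simp, ?_, ?_, by simp⟩
                · intro u hu
                  rcases List.mem_cons.mp hu with rfl | hu
                  · exact hxt
                  · exact hall u hu
                · rw [hrB, runGo_all_high t rest hall]
                  simp
                  omega
      · -- Srun (x :: rest)
        intro i s cur k pk wd hik
        by_cases hx : x < t
        · -- below threshold: the run closes here
          have hstep : loopA t (enumFromA i (x :: rest)) (pk, wd, true, cur, s) =
              loopA t (enumFromA (i + 1) rest) (pk ++ [cur], wd ++ [i - s], false, 0, s) := by
            simp only [enumFromA]; exact loopA_step_run_low t x i _ pk wd cur s hx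
          have hg : runGo t (x :: rest) cur k = (cur, k) :: runsB t rest := by
            rw [runGo, if_neg (by omega : ¬ t ≤ x)]
          have hw : i - s = (k : Int) := by omega
          constructor
          · intro hne
            have hre : rest ≠ [] := by rintro rfl; exact hne ⟨x, by simp, hx⟩
            have hhigh : endsHigh t rest := by
              by_contra hnb
              exact hne ((endsBelow_cons t x rest hre).mpr ((not_endsHigh_iff t rest hre).mp hnb))
            have hrne := runsB_ne_nil_of_endsHigh t rest hhigh
            have h2 := (ihF (i + 1) s (pk ++ [cur]) (wd ++ [i - s])).2 hhigh
            constructor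
            · rw [hstep, h2.1, hg]
              unfold openState
              rw [List.dropLast_cons_of_ne_nil hrne, getLastD_cons_ne _ _ _ hrne]
              simp [peaksOf, widthsOf, hw]
              omega
            · intro hdl
              rw [hg, List.dropLast_cons_of_ne_nil hrne] at hdl
              simp at hdl
          · intro hbl
            rcases eq_or_ne rest [] with hre | hre
            · subst hre
              refine ⟨s, ?_⟩
              rw [hstep]
              simp [enumFromA, loopA, hg, runsB, peaksOf, widthsOf, hw]
            · have hnothigh : ¬ endsHigh t rest :=
                (not_endsHigh_iff t rest hre).mpr ((endsBelow_cons t x rest hre).mp hbl)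
              obtain ⟨s', he⟩ := (ihF (i + 1) s (pk ++ [cur]) (wd ++ [i - s])).1 hnothigh
              refine ⟨s', ?_⟩
              rw [hstep, he, hg]
              simp [peaksOf, widthsOf, hw]
        · -- at/above threshold: the run continues
          have hxt : t ≤ x := not_lt.mp hx
          have hstep : loopA t (enumFromA i (x :: rest)) (pk, wd, true, cur, s) =
              loopA t (enumFromA (i + 1) rest) (pk, wd, true, if cur < x then x else cur, s) := by
            simp only [enumFromA]; exact loopA_step_run_high t x i _ pk wd cur s hxt
          have hg : runGo t (x :: rest) cur k = runGo t rest (if cur < x then x else cur) (k + 1) := by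
            rw [runGo, if_pos hxt]
          have hSr := ihR (i + 1) s (if cur < x then x else cur) (k + 1) pk wd (by push_cast; omega)
          rcases eq_or_ne rest [] with hre | hre
          · subst hre
            constructor
            · intro _
              constructor
              · rw [hstep, hg]
                simp [enumFromA, loopA, runGo, openState, peaksOf, widthsOf]
                omega
              · intro _ u hu
                rcases List.mem_cons.mp hu with rfl | hu
                · exact hxt
                · simp at hu
            · rintro ⟨v, hv, hvt⟩; simp at hv; omega
          · constructor
            · intro hne
              have hnb : ¬ endsBelow t rest := fun hb => hne ((endsBelow_cons t x rest hre).mpr hb)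
              have ho := hSr.1 hnb
              constructor
              · rw [hstep, ho.1, hg, openState_shift]
                simp
              · intro hdl u hu
                rcases List.mem_cons.mp hu with rfl | hu
                · exact hxt
                · exact ho.2 (by rw [hg] at hdl; exact hdl) u hu
            · intro hbl
              obtain ⟨s', he⟩ := hSr.2 ((endsBelow_cons t x rest hre).mp hbl)
              exact ⟨s', by rw [hstep, he, hg]⟩

theorem sfresh_all (t : Int) (xs : List Int) : Sfresh t xs :=
  (main_induction t xs.length xs le_rfl).1

theorem takeWhile_low (t : Int) (ys zs : List Int) (hys : ∀ u ∈ ys, u < t)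
    (hz : ∀ u ∈ zs, t ≤ u) (hzne : zs ≠ []) :
    (ys ++ zs).takeWhile (fun v => decide (v < t)) = ys := by
  induction ys with
  | nil =>
    match zs, hzne with
    | z :: r, _ =>
      have : ¬ z < t := by have := hz z (by simp); omega
      simp [this]
  | cons y ys ih =>
    simp [hys y (by simp), ih (fun u hu => hys u (by simp [hu]))]

theorem rs_decomp {α : Type} (rs : List α) (d : α) (h : rs ≠ []) :
    rs = rs.dropLast ++ [rs.getLastD d] := by
  obtain ⟨v, hv⟩ := Option.isSome_iff_exists.mp (List.getLast?_isSome.mpr h)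
  rw [List.getLastD_eq_getLast?, hv]
  exact (List.dropLast_append_getLast? v hv).symm

theorem singleton_of_dropLast {α : Type} (rs : List α) (d : α) (h1 : rs ≠ [])
    (h2 : rs.dropLast = []) : rs = [rs.getLastD d] := by
  have := rs_decomp rs d h1
  rw [h2] at this
  simpa using this

theorem runsB_low_prefix (t : Int) (ys l : List Int) (hys : ∀ u ∈ ys, u < t) :
    runsB t (ys ++ l) = runsB t l := by
  induction ys with
  | nil => rfl
  | cons y ys ih =>
    rw [List.cons_append, runsB_skip t y _ (hys y (by simp)), ih (fun u hu => hys u (by simp [hu]))]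

theorem finishA_true_nil (n : Int) (wd : List Int) (c st : Int) :
    finishA n ([], wd, true, c, st) = ([c], wd ++ [n]) := by simp [finishA]

theorem finishA_true_cons (n : Int) (pk wd : List Int) (c st : Int) (h : pk ≠ []) :
    finishA n (pk, wd, true, c, st) = (pk ++ [c], wd ++ [n - st]) := by simp [finishA, h]

theorem finishA_false_cons (n : Int) (pk wd : List Int) (c st : Int) (h : pk ≠ []) :
    finishA n (pk, wd, false, c, st) = (pk, wd) := by simp [finishA, h]

-- ===== VERDICT (by name: the statement is the Claim_ definition above) =====
theorem get_outbreaks_spec : Claim_unchanged_get_outbreaks := by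
  intro data t _ hnd
  show get_outbreaks data t = get_outbreaks_alt data t
  simp only [get_outbreaks, get_outbreaks_alt]
  have hS := sfresh_all t data 0 0 [] []
  by_cases hh : endsHigh t data
  · have heq := (hS.2 hh).1
    have hsing := (hS.2 hh).2
    have hrne := runsB_ne_nil_of_endsHigh t data hh
    rw [heq, if_neg hrne]
    rcases eq_or_ne (runsB t data).dropLast [] with hdl | hdl
    · -- the only outbreak runs to the end of the timeline
      obtain ⟨ys, zs, hsp, hys, hzs, hlenz, hzne⟩ := hsing hdl
      have hys0 : ys = [] := by
        by_contra hyne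
        apply hnd
        have htw : data.takeWhile (fun v => decide (v < t)) = ys := by
          rw [hsp]; exact takeWhile_low t ys zs hys hzs hzne
        refine ⟨by rw [htw]; exact List.length_pos_iff.mpr hyne, ?_, ?_⟩
        · rw [htw, hsp]; simp [List.length_append]
          exact List.length_pos_iff.mpr hzne
        · rw [htw, hsp, List.drop_left]
          exact hzs
      subst hys0
      simp only [List.nil_append] at hsp
      have hsingle := singleton_of_dropLast (runsB t data) (0,0) hrne hdl
      have hlst : (((runsB t data).getLastD (0,0)).2 : Int) = (data.length : Int) := by
        rw [← hlenz, hsp]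
      have hop : openState 0 data.length [] [] (runsB t data) =
          ([], [], true, ((runsB t data).getLastD (0,0)).1,
           0 + (data.length : Int) - (((runsB t data).getLastD (0,0)).2 : Int)) := by
        simp [openState, hdl, peaksOf, widthsOf]
      rw [hop, finishA_true_nil]
      conv_rhs => rw [hsingle]
      rw [List.getLastD_eq_getLast?] at hlst
      simp
      omega
    · -- several outbreaks, the last one still open
      have hpk : peaksOf (runsB t data).dropLast ≠ [] := by
        unfold peaksOf; simp only [ne_eq, List.map_eq_nil_iff]; exact hdl
      simp only [openState, List.nil_append]
      rw [finishA_true_cons _ _ _ _ _ hpk]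
      conv_rhs => rw [rs_decomp (runsB t data) (0,0) hrne]
      simp [peaksOf, widthsOf]
  · obtain ⟨s', heq⟩ := hS.1 hh
    rw [heq]
    rcases eq_or_ne (runsB t data) [] with hre | hre
    · simp [hre, peaksOf, widthsOf, finishA]
    · have hpk : peaksOf (runsB t data) ≠ [] := by simp [peaksOf, hre]
      rw [List.nil_append, List.nil_append, finishA_false_cons _ _ _ _ _ hpk, if_neg hre]
      simp [peaksOf, widthsOf]

theorem get_outbreaks_changed : Claim_changed_get_outbreaks := by unfold Claim_changed_get_outbreaks; decide
theorem get_outbreaks_tight : Claim_exact_get_outbreaks := by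
  intro data t _ hd
  obtain ⟨hk0, hkn, hdrop⟩ := hd
  obtain ⟨sfx, hsfx⟩ := List.takeWhile_prefix (l := data) (fun v => decide (v < t))
  have hdropeq : data.drop (data.takeWhile (fun v => decide (v < t))).length = sfx := by
    have h := List.drop_left (l₁ := data.takeWhile (fun v => decide (v < t))) (l₂ := sfx)
    rw [hsfx] at h
    exact h
  have hsall : ∀ u ∈ sfx, t ≤ u := by rw [← hdropeq]; exact hdrop
  have htwall : ∀ u ∈ data.takeWhile (fun v => decide (v < t)), u < t := fun u hu => by
    simpa using List.mem_takeWhile_imp hu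
  have hlen : data.length = (data.takeWhile (fun v => decide (v < t))).length + sfx.length := by
    have h := congrArg List.length hsfx
    simp at h
    omega
  cases sfx with
  | nil => simp at hlen; omega
  | cons z sfx' =>
    have hz : t ≤ z := hsall z (by simp)
    have hrs : runsB t data =
        [(List.foldl (fun a v => if a < v then v else a) (if (0:Int) < z then z else 0) sfx',
          1 + sfx'.length)] := by
      rw [← hsfx, runsB_low_prefix t _ _ htwall, runsB_run t z sfx' (by omega),
          runGo_all_high t sfx' (fun u hu => hsall u (by simp [hu]))]
    have hh : endsHigh t data := by
      obtain ⟨v, hv⟩ := Option.isSome_iff_exists.mp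
        (List.getLast?_isSome.mpr (List.cons_ne_nil z sfx'))
      refine ⟨v, ?_, hsall v (List.mem_of_getLast? hv)⟩
      rw [← hsfx, List.getLast?_append_of_ne_nil _ (List.cons_ne_nil z sfx')]
      exact hv
    have hS := sfresh_all t data 0 0 [] []
    have heq := (hS.2 hh).1
    simp only [get_outbreaks, get_outbreaks_alt]
    rw [heq]
    have hrne : runsB t data ≠ [] := by rw [hrs]; simp
    rw [if_neg hrne]
    have hop : openState 0 data.length [] [] (runsB t data) =
        ([], [], true, ((runsB t data).getLastD (0,0)).1,
         0 + (data.length : Int) - (((runsB t data).getLastD (0,0)).2 : Int)) := by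
      rw [hrs]; simp [openState, peaksOf, widthsOf]
    rw [hop, finishA_true_nil]
    intro hcon
    have h2 := congrArg Prod.snd hcon
    rw [hrs] at h2
    simp at h2
    simp at hlen
    omega
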